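-- pv_equiv track=rewrite | github.com/wpjwegman/tournament-organizer-system | documents/scripts/fix_markdown_lint.py | fix_yaml_front_matter_spacing
-- ===== SOURCE A (Python) =====
-- from typing import List
--
-- def fix_yaml_front_matter_spacing(lines: List[str]) -> List[str]:
--     """Fix YAML front matter list spacing issues."""
--     result = []
--     in_front_matter = False
--
--     for i, line in enumerate(lines):
--         if i == 0 and line.strip() == "---":
--             in_front_matter = True
--             result.append(line)
--         elif in_front_matter and line.strip() == "---":
--             in_front_matter = False
--             result.append(line)
--             # Ensure blank line after front matter
--             if i + 1 < len(lines) and lines[i + 1].strip() != "":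
--                 result.append("")
--         elif in_front_matter:
--             result.append(line)
--         else:
--             result.append(line)
--
--     return result
-- ===== SOURCE B (Python) =====
-- from typing import List
--
-- def fix_yaml_front_matter_spacing(lines: List[str]) -> List[str]:
--     """Fix YAML front matter list spacing issues."""
--     if not lines or lines[0].strip() != "---":
--         return list(lines)
--     result = list(lines)
--     for j in range(1, len(lines)):
--         if lines[j].strip() == "---":
--             if j + 1 < len(lines) and lines[j + 1].strip() != "":
--                 result.insert(j + 1, "")
--             break
--     return result
-- ===== Notes on version B (the rewrite author's own statement) =====
-- stated objective: simpler
-- what changed: Replaces A's stateful rebuild of the whole list (enumerate loop with an in_front_matter flag appending every line to a fresh result) by a guard on the first line plus a search for the first closing '---', doing at most one insert into a copy of the input.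
import Mathlib
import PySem

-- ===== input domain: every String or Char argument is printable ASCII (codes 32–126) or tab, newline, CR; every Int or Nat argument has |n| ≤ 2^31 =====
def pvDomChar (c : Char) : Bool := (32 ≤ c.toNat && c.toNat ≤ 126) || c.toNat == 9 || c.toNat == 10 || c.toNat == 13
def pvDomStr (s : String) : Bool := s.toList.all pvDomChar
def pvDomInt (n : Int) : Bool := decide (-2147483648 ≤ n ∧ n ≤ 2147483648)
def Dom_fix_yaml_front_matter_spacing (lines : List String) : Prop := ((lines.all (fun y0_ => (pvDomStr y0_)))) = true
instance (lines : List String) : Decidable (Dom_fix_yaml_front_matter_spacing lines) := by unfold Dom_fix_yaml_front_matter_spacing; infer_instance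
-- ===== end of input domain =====

-- B replaces A's stateful rebuild by a guard plus a single search-and-insert (objective: simpler).

-- ===== PORT A =====
-- A's for-loop over enumerate(lines) with state (result, in_front_matter).
def pvLoopA (lines : List String) : List (Int × String) → (List String × Bool) → (List String × Bool)
  | [], st => st
  | (i, line) :: rest, (result, infm) =>
    pvLoopA lines rest
      (if i = 0 ∧ PySem.Str.strip line = "---" then (result ++ [line], true)
       else if infm ∧ PySem.Str.strip line = "---" then
         ((result ++ [line]) ++
            (if i + 1 < (lines.length : Int) ∧ PySem.Str.strip (PySem.List.pyGetD lines (i + 1) "") ≠ "" then [""] else []),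
          false)
       else (result ++ [line], infm))

def fix_yaml_front_matter_spacing (lines : List String) : List String :=
  (pvLoopA lines (PySem.List.enumerate lines) ([], false)).1

-- ===== PORT B =====
def fix_yaml_front_matter_spacing_alt (lines : List String) : List String :=
  match lines with
  | [] => []
  | h :: t =>
    if PySem.Str.strip h ≠ "---" then h :: t
    else
      -- for j in range(1, len(lines)): break at first closing '---' (index j = k+1 here)
      match t.findIdx? (fun l => PySem.Str.strip l == "---") with
      | none => h :: t
      | some k =>
        if ((k : Int) + 2 < ((h :: t).length : Int)) ∧ PySem.Str.strip (t.getD (k + 1) "") ≠ "" then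
          PySem.List.insert (h :: t) ((k : Int) + 2) ""
        else h :: t

-- ===== PRECONDITION & SPEC =====
def Spec_fix_yaml_front_matter_spacing (lines : List String) (out : List String) : Prop := out = fix_yaml_front_matter_spacing_alt lines
instance (lines : List String) (out : List String) : Decidable (Spec_fix_yaml_front_matter_spacing lines out) := by unfold Spec_fix_yaml_front_matter_spacing; infer_instance

-- ===== CLAIM (what is proved, stated in full; the proofs are below) =====
def Claim_equal_fix_yaml_front_matter_spacing : Prop := ∀ (lines : List String), Dom_fix_yaml_front_matter_spacing lines → Spec_fix_yaml_front_matter_spacing lines (fix_yaml_front_matter_spacing lines)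

-- ===== LEMMAS AND PROOFS =====

-- With the flag off and no index 0 left, the loop just appends every remaining line.
theorem pvLoopA_false (lines : List String) :
    ∀ (ps : List (Int × String)) (r : List String),
      (∀ p ∈ ps, p.1 ≠ 0) → pvLoopA lines ps (r, false) = (r ++ ps.map Prod.snd, false) := by
  intro ps
  induction ps with
  | nil => intro r _; simp [pvLoopA]
  | cons p rest ih =>
    intro r hne
    obtain ⟨i, line⟩ := p
    have hi : i ≠ 0 := hne (i, line) (List.mem_cons_self ..)
    simp only [pvLoopA]
    rw [if_neg (by simp [hi]), if_neg (by simp)]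
    rw [ih (r ++ [line]) (fun q hq => hne q (List.mem_cons_of_mem _ hq))]
    simp

theorem pv_enum_ne_zero (t : List String) (m : Nat) :
    ∀ p ∈ PySem.List.enumerate t ((m : Int) + 1), p.1 ≠ 0 := by
  intro p hp
  rw [PySem.List.mem_enumerate_iff] at hp
  obtain ⟨k, hk, rfl⟩ := hp
  simp
  omega

theorem pv_getD_eq (lines : List String) (n : Nat) (t : List String)
    (hdrop : lines.drop (n + 1) = t) (j : Nat) :
    PySem.List.pyGetD lines ((n : Int) + 1 + (j : Int)) "" = t.getD j "" := by
  have hc : ((n : Int) + 1 + (j : Int)) = ((n + 1 + j : Nat) : Int) := by push_cast; ring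
  rw [hc, PySem.List.pyGetD_natCast]
  have h2 := congrArg (fun l => l[j]?) hdrop
  simp only [List.getElem?_drop] at h2
  simp [List.getD, ← h2]

theorem pvLoopA_true (lines : List String) :
    ∀ (t : List String) (n : ℕ) (r : List String), lines.drop (n + 1) = t →
      pvLoopA lines (PySem.List.enumerate t ((n : Int) + 1)) (r, true) =
        (match t.findIdx? (fun l => PySem.Str.strip l == "---") with
         | none => (r ++ t, true)
         | some k =>
            (r ++ t.take (k + 1) ++
              (if k + 1 < t.length ∧ PySem.Str.strip (t.getD (k + 1) "") ≠ "" then [""] else []) ++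
              t.drop (k + 1), false)) := by
  intro t
  induction t with
  | nil => intro n r _; simp [pvLoopA, PySem.List.enumerate]
  | cons x xs ih =>
    intro n r hdrop
    have hlen : n + 1 < lines.length := by
      by_contra h
      have : lines.drop (n + 1) = [] := List.drop_eq_nil_of_le (by omega)
      rw [hdrop] at this; exact List.cons_ne_nil _ _ this
    have hlent : xs.length + (n + 2) = lines.length := by
      have := congrArg List.length hdrop
      simp [List.length_drop] at this
      omega
    have hne0 : ¬ (((n : Int) + 1) = 0 ∧ PySem.Str.strip x = "---") := by
      rintro ⟨h, -⟩; omega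
    rw [PySem.List.enumerate_cons]
    by_cases hx : PySem.Str.strip x = "---"
    · -- closing line found at this position
      simp only [pvLoopA]
      rw [if_neg hne0, if_pos (by simp [hx])]
      rw [pvLoopA_false lines _ _ (by
        have := pv_enum_ne_zero xs (n + 1)
        intro p hp
        refine this p ?_
        have hc : (n : Int) + 1 + 1 = ((n + 1 : Nat) : Int) + 1 := by push_cast; ring
        rwa [hc] at hp)]
      have hguard : (((n : Int) + 1 + 1 < (lines.length : Int)) ∧
          PySem.Str.strip (PySem.List.pyGetD lines ((n : Int) + 1 + 1) "") ≠ "") ↔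
          (0 + 1 < (x :: xs).length ∧ PySem.Str.strip ((x :: xs).getD (0 + 1) "") ≠ "") := by
        have hg1 : PySem.List.pyGetD lines ((n : Int) + 1 + 1) "" = (x :: xs).getD 1 "" := by
          have := pv_getD_eq lines n (x :: xs) hdrop 1
          simpa using this
        rw [hg1]
        constructor
        · rintro ⟨ha, hb⟩
          exact ⟨by simp; omega, hb⟩
        · rintro ⟨ha, hb⟩
          refine ⟨?_, hb⟩
          simp at ha
          push_cast
          omega
      rw [List.findIdx?_cons,
        if_pos (show (PySem.Str.strip x == "---") = true by simp [hx])]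
      simp only [PySem.List.map_snd_enumerate]
      simp only [List.take_succ_cons, List.take_zero, List.drop_succ_cons, List.drop_zero]
      by_cases hg : 0 + 1 < (x :: xs).length ∧ PySem.Str.strip ((x :: xs).getD (0 + 1) "") ≠ ""
      · rw [if_pos (hguard.mpr hg), if_pos (by simpa using hg)]
      · rw [if_neg (fun h => hg (hguard.mp h)), if_neg (by simpa using hg)]
    · -- not the closing line: stay in front matter
      simp only [pvLoopA]
      rw [if_neg hne0, if_neg (by simp [hx])]
      have hdrop' : lines.drop (n + 1 + 1) = xs := by
        have h2 : (lines.drop (n + 1)).drop 1 = xs := by rw [hdrop]; simp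
        rw [List.drop_drop] at h2
        exact h2
      have hc : (n : Int) + 1 + 1 = ((n + 1 : ℕ) : Int) + 1 := by push_cast; ring
      rw [hc, ih (n + 1) (r ++ [x]) hdrop']
      rw [List.findIdx?_cons, if_neg (by simp [hx])]
      cases hfi : xs.findIdx? (fun l => PySem.Str.strip l == "---") with
      | none => simp
      | some k =>
        simp only [Option.map_some, List.length_cons, List.getD_cons_succ,
          List.take_succ_cons, List.drop_succ_cons, Nat.add_lt_add_iff_right]
        simp

theorem pv_main : ∀ (lines : List String),
    fix_yaml_front_matter_spacing lines = fix_yaml_front_matter_spacing_alt lines := by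
  intro lines
  match lines with
  | [] => rfl
  | h :: t =>
    unfold fix_yaml_front_matter_spacing fix_yaml_front_matter_spacing_alt
    rw [PySem.List.enumerate_cons]
    by_cases hh : PySem.Str.strip h = "---"
    · simp only [pvLoopA]
      rw [if_pos (by simp [hh]), if_neg (by simp [hh])]
      simp only [List.nil_append]
      have h01 : (0 : Int) + 1 = ((0 : ℕ) : Int) + 1 := by norm_num
      rw [h01, pvLoopA_true (h :: t) t 0 [h] (by simp)]
      cases hfi : t.findIdx? (fun l => PySem.Str.strip l == "---") with
      | none => simp
      | some k =>
        have hk : k < t.length := (List.findIdx?_eq_some_iff_findIdx_eq.mp hfi).1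
        simp only
        by_cases hg : k + 1 < t.length ∧ PySem.Str.strip (t.getD (k + 1) "") ≠ ""
        · rw [if_pos hg, if_pos (by
            refine ⟨?_, hg.2⟩
            have := hg.1
            simp only [List.length_cons]
            push_cast
            omega)]
          have hcast : ((k : Int) + 2) = ((k + 2 : ℕ) : Int) := by push_cast; ring
          rw [hcast, PySem.List.insert_natCast _ _ _ (by simp; omega)]
          have ht : (h :: t).take (k + 2) = h :: t.take (k + 1) := by
            simp [List.take_succ_cons]
          have hd : (h :: t).drop (k + 2) = t.drop (k + 1) := by
            simp [List.drop_succ_cons]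
          rw [ht, hd]
          simp
        · rw [if_neg hg, if_neg (by
            rintro ⟨ha, hb⟩
            refine hg ⟨?_, hb⟩
            simp only [List.length_cons] at ha
            push_cast at ha
            omega)]
          simp
    · simp only [pvLoopA]
      rw [if_neg (by simp [hh]), if_neg (by simp), if_pos (by simp [hh])]
      rw [pvLoopA_false (h :: t) _ _ (by
        have := pv_enum_ne_zero t 0
        intro p hp
        refine this p ?_
        have hc : (0 : Int) + 1 = ((0 : Nat) : Int) + 1 := by norm_num
        rwa [hc] at hp)]
      simp [PySem.List.map_snd_enumerate]

-- ===== VERDICT (by name: the statement is the Claim_ definition above) =====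
theorem fix_yaml_front_matter_spacing_spec : Claim_equal_fix_yaml_front_matter_spacing := by
  intro lines _
  exact pv_main lines
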